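-- pv_equiv track=rewrite | github.com/chiragk31/ClairDash | backend/app/utils/text_cleaner.py | is_auto_reply
-- ===== SOURCE A (Python) =====
-- def is_auto_reply(subject: str, body: str) -> bool:
--     """
--     Detects if the email is an auto-reply or out-of-office.
--     Helps avoid processing system-generated emails as complaints.
--     """
--     auto_reply_keywords = [
--         'auto-reply',
--         'out of office',
--         'automatic reply',
--         'autoreply',
--         'do not reply',
--         'noreply',
--         'no-reply',
--         'delivery failed',
--         'undeliverable',
--         'mailer-daemon'
--     ]
--
--     subject_lower = subject.lower()
--     body_lower = body.lower()
--
--     for keyword in auto_reply_keywords: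
--         if keyword in subject_lower or keyword in body_lower:
--             return True
--
--     return False
-- ===== SOURCE B (Python) =====
-- _KEYWORDS = (
--     'auto-reply',
--     'out of office',
--     'automatic reply',
--     'autoreply',
--     'do not reply',
--     'noreply',
--     'no-reply',
--     'delivery failed',
--     'undeliverable',
--     'mailer-daemon',
-- )
--
--
-- def is_auto_reply(subject: str, body: str) -> bool:
--     """Single left-to-right scan per string: at each position, test whether
--     any keyword starts there, instead of one substring search per keyword."""
--     def hit(text: str) -> bool:
--         t = text.lower()
--         return any(t.startswith(k, i)
--                    for i in range(len(t) + 1)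
--                    for k in _KEYWORDS)
--     return hit(subject) or hit(body)
-- ===== Notes on version B (the rewrite author's own statement) =====
-- stated objective: alternative
-- what changed: A runs one library substring search per keyword over each lowered string with early return; B makes a single position-major left-to-right scan of each lowered string, testing at every position whether any keyword is a prefix of the remaining suffix.
import Mathlib
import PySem

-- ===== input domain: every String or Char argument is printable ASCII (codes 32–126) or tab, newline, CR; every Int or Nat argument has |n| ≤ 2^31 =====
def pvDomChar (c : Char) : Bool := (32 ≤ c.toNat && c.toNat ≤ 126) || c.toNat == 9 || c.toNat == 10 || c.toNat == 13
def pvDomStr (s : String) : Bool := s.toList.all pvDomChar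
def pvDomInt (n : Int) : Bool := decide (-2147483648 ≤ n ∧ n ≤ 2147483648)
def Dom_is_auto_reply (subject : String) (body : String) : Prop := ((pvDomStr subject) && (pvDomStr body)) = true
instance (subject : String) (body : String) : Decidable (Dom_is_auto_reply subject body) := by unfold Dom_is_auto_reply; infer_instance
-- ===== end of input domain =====

-- B replaces A's per-keyword substring searches by one position-major scan per string (objective: alternative decomposition).

-- ===== PORT A =====
def pvKeywordsA : List String :=
  ["auto-reply", "out of office", "automatic reply", "autoreply", "do not reply",
   "noreply", "no-reply", "delivery failed", "undeliverable", "mailer-daemon"]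

-- A's 'for keyword in …: if … : return True' loop with early return
def pvLoopA (sl bl : String) : List String → Bool
  | [] => false
  | k :: rest =>
      if PySem.Str.isIn k sl || PySem.Str.isIn k bl then true
      else pvLoopA sl bl rest

def is_auto_reply (subject : String) (body : String) : Bool :=
  let subject_lower := PySem.Str.lower subject
  let body_lower := PySem.Str.lower body
  pvLoopA subject_lower body_lower pvKeywordsA

-- ===== PORT B =====
def pvKeywordsB : List (List Char) :=
  ["auto-reply".toList, "out of office".toList, "automatic reply".toList, "autoreply".toList,
   "do not reply".toList, "noreply".toList, "no-reply".toList, "delivery failed".toList,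
   "undeliverable".toList, "mailer-daemon".toList]

-- B's generator 'any(t.startswith(k, i) for i in range(len(t)+1) for k in keywords)':
-- one pass over the positions (suffixes) of t, testing each keyword as a prefix there
def pvScanB : List Char → Bool
  | [] => pvKeywordsB.any (fun k => PySem.Chars.startswith [] k)
  | c :: rest =>
      pvKeywordsB.any (fun k => PySem.Chars.startswith (c :: rest) k) || pvScanB rest

def is_auto_reply_alt (subject : String) (body : String) : Bool :=
  pvScanB (PySem.Chars.lower subject.toList) || pvScanB (PySem.Chars.lower body.toList)

-- ===== PRECONDITION & SPEC =====
def Spec_is_auto_reply (subject : String) (body : String) (out : Bool) : Prop := out = is_auto_reply_alt subject body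
instance (subject : String) (body : String) (out : Bool) : Decidable (Spec_is_auto_reply subject body out) := by unfold Spec_is_auto_reply; infer_instance

-- ===== CLAIM (what is proved, stated in full; the proofs are below) =====
def Claim_equal_is_auto_reply : Prop := ∀ (subject : String) (body : String), Dom_is_auto_reply subject body → Spec_is_auto_reply subject body (is_auto_reply subject body)

-- ===== LEMMAS AND PROOFS =====

theorem pvScanB_iff (t : List Char) :
    pvScanB t = true ↔ ∃ k ∈ pvKeywordsB, k <:+: t := by
  induction t with
  | nil =>
      simp [pvScanB, PySem.Chars.startswith_iff, List.prefix_nil, List.infix_nil]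
  | cons c rest ih =>
      simp only [pvScanB, Bool.or_eq_true, List.any_eq_true, ih,
        PySem.Chars.startswith_iff, List.infix_cons_iff]
      constructor
      · rintro (⟨k, hk, hp⟩ | ⟨k, hk, hi⟩)
        · exact ⟨k, hk, Or.inl hp⟩
        · exact ⟨k, hk, Or.inr hi⟩
      · rintro ⟨k, hk, hp | hi⟩
        · exact Or.inl ⟨k, hk, hp⟩
        · exact Or.inr ⟨k, hk, hi⟩

theorem pvLoopA_iff (sl bl : String) (ks : List String) :
    pvLoopA sl bl ks = true ↔
      ∃ k ∈ ks, (PySem.Str.isIn k sl = true ∨ PySem.Str.isIn k bl = true) := by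
  induction ks with
  | nil => simp [pvLoopA]
  | cons k rest ih =>
      by_cases h : (PySem.Str.isIn k sl || PySem.Str.isIn k bl) = true
      · rw [pvLoopA, if_pos h]
        rcases Bool.or_eq_true_iff.mp h with h' | h'
        · exact iff_of_true rfl ⟨k, List.mem_cons_self, Or.inl h'⟩
        · exact iff_of_true rfl ⟨k, List.mem_cons_self, Or.inr h'⟩
      · rw [pvLoopA, if_neg h, ih]
        constructor
        · rintro ⟨x, hx, hp⟩; exact ⟨x, List.mem_cons_of_mem _ hx, hp⟩
        · rintro ⟨x, hx, hp⟩
          rcases List.mem_cons.mp hx with rfl | hx'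
          · exact absurd (Bool.or_eq_true_iff.mpr hp) h
          · exact ⟨x, hx', hp⟩

theorem pvKeywordsB_eq_map : pvKeywordsB = pvKeywordsA.map String.toList := rfl

theorem is_auto_reply_spec : Claim_equal_is_auto_reply := by
  intro subject body _
  unfold Spec_is_auto_reply
  rw [Bool.eq_iff_iff]
  unfold is_auto_reply is_auto_reply_alt
  simp only [pvLoopA_iff, Bool.or_eq_true, pvScanB_iff,
    PySem.Str.isIn_iff_infix, PySem.Str.toList_lower]
  constructor
  · rintro ⟨k, hk, h | h⟩
    · exact Or.inl ⟨k.toList, pvKeywordsB_eq_map ▸ List.mem_map_of_mem hk, h⟩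
    · exact Or.inr ⟨k.toList, pvKeywordsB_eq_map ▸ List.mem_map_of_mem hk, h⟩
  · rintro (⟨k, hk, h⟩ | ⟨k, hk, h⟩) <;>
      rw [pvKeywordsB_eq_map] at hk <;>
      obtain ⟨a, ha, rfl⟩ := List.mem_map.mp hk
    · exact ⟨a, ha, Or.inl h⟩
    · exact ⟨a, ha, Or.inr h⟩
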